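-- pv_equiv track=rewrite | github.com/Arseniy007/CS50AI | 2. pagerank/pagerank.py | reverse_corpus
-- ===== SOURCE A (Python) =====
-- def reverse_corpus(corpus: dict) -> dict:
--     """
--     Create dict out of corpus where keys will be the titles of the pages
--     and values: the pages that link to key-page rather than pages to which key-page links
--     """
--     reversed_corpus = dict()
--
--     # Add link to every page if page has no links
--     for page in corpus.keys():
--         if not corpus[page]:
--             corpus[page] = corpus.keys()
--
--     for page in corpus.keys():
--         # Find all pages linking to current page
--         source_pages = set()
--         for source_page, target_pages in corpus.items():
--             if page in target_pages:
--                 source_pages.add(source_page)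
--         reversed_corpus[page] = source_pages
--     return reversed_corpus
-- ===== SOURCE B (Python) =====
-- def reverse_corpus(corpus: dict) -> dict:
--     """
--     Single pass over the edges: for every (source, targets) item, add source to the
--     reverse-set of each target that is a page of the corpus; a page with no links is
--     treated as linking to every page.  (Unlike A, this does not mutate `corpus` in
--     place; the return value is the same.)
--     """
--     keys = list(corpus)
--     key_set = set(keys)
--     rev = {page: set() for page in keys}
--     for source, targets in corpus.items():
--         for t in (targets or keys):
--             if t in key_set:
--                 rev[t].add(source)
--     return rev
-- ===== Notes on version B (the rewrite author's own statement) =====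
-- stated objective: faster
-- what changed: A scans the whole corpus once per page (for every page it rebuilds the source set by testing membership in every target list); B makes a single pass over the edges, accumulating each source into the reverse-set of each of its targets; Pre_ only states the dict representation invariant (distinct keys in the association list), which excludes no Python input since a Python dict cannot have duplicate keys; B does not mutate the input dict (A fills empty values in place) — the return value is identical.
import Mathlib
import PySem

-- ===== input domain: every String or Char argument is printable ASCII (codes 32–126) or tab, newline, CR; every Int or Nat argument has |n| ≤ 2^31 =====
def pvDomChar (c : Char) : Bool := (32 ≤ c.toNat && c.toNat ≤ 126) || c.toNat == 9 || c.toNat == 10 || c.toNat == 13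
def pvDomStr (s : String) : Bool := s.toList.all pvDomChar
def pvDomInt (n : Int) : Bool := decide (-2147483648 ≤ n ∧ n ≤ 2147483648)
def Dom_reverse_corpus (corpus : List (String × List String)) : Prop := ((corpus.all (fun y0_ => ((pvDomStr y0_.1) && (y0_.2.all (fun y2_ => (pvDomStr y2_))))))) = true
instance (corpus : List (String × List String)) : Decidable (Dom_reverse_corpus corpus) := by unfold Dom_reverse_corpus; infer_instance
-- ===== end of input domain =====

-- B replaces A's per-page scan of the whole corpus by a single accumulating pass over the
-- edges (asymptotically faster); equivalence is about the RETURN value only: A mutates the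
-- input dict in place (fills empty values), B does not.


-- ===== PORT A =====
def reverse_corpus (corpus : List (String × List String)) : List (String × List String) :=
  let d0 : PySem.Dict String (List String) := PySem.Dict.mk corpus
  -- for page in corpus.keys(): if not corpus[page]: corpus[page] = corpus.keys()
  -- (corpus.keys() is a view; keys never change here, so it equals the keys at assignment time)
  let d1 := (PySem.Dict.keys d0).foldl
      (fun c page =>
        if c.getD page [] = [] then c.insert page (PySem.Dict.keys c) else c) d0
  -- for page in corpus.keys(): source_pages = {s | page in corpus[s]}; reversed_corpus[page] = source_pages
  let rev := (PySem.Dict.keys d1).foldl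
      (fun r page =>
        let source_pages : PySem.Set String :=
          d1.items.foldl
            (fun s p => if p.2.contains page then PySem.Set.add s p.1 else s)
            PySem.Set.empty
        r.insert page source_pages)
      (PySem.Dict.empty : PySem.Dict String (PySem.Set String))
  rev.items

-- ===== PORT B =====
def reverse_corpus_alt (corpus : List (String × List String)) : List (String × List String) :=
  let d : PySem.Dict String (List String) := PySem.Dict.mk corpus
  let keys := PySem.Dict.keys d                              -- keys = list(corpus)
  -- rev = {page: set() for page in keys}
  let rev0 := keys.foldl
      (fun r p => r.insert p PySem.Set.empty)
      (PySem.Dict.empty : PySem.Dict String (PySem.Set String))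
  -- for source, targets in corpus.items(): for t in (targets or keys): if t in key_set: rev[t].add(source)
  let rev := d.items.foldl
      (fun r p =>
        (if p.2 = [] then keys else p.2).foldl
          (fun r t =>
            if keys.contains t then r.modify t PySem.Set.empty (fun s => PySem.Set.add s p.1) else r)
          r)
      rev0
  rev.items

-- ===== PRECONDITION & SPEC =====
-- Pre_ states the dict representation invariant only: the association list stands for a Python
-- dict, whose keys are necessarily distinct, so no input the Python A accepts is excluded.
def Pre_reverse_corpus (corpus : List (String × List String)) : Prop :=
  (corpus.map Prod.fst).Nodup
instance (corpus : List (String × List String)) : Decidable (Pre_reverse_corpus corpus) := by unfold Pre_reverse_corpus; infer_instance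
def pvWitness_reverse_corpus : (List (String × List String)) :=
  [("a", ["b"]), ("b", []), ("c", ["a", "x"])]
def Spec_reverse_corpus (corpus : List (String × List String)) (out : List (String × List String)) : Prop := out = reverse_corpus_alt corpus
instance (corpus : List (String × List String)) (out : List (String × List String)) : Decidable (Spec_reverse_corpus corpus out) := by unfold Spec_reverse_corpus; infer_instance

-- ===== CLAIM (what is proved, stated in full; the proofs are below) =====
def Claim_equal_reverse_corpus : Prop := ∀ (corpus : List (String × List String)), Dom_reverse_corpus corpus → Pre_reverse_corpus corpus → Spec_reverse_corpus corpus (reverse_corpus corpus)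

-- ===== LEMMAS AND PROOFS =====

-- fold of Set.add over a fresh nodup list appends
lemma pv_foldl_add_nodup (xs : List String) : ∀ (s : List String), (s ++ xs).Nodup →
    xs.foldl PySem.Set.add s = s ++ xs := by
  induction xs with
  | nil => simp
  | cons x xs ih =>
    intro s h
    have hx : x ∉ s := by
      intro hxs
      exact (List.disjoint_of_nodup_append h) hxs (by simp)
    rw [List.foldl_cons, PySem.Set.add_of_not_mem hx, ih (s ++ [x]) (by simpa using h)]
    simp

lemma pv_keys_mk (l : List (String × List String)) :
    (PySem.Dict.mk l).keys = l.map Prod.fst := by simp [PySem.Dict.keys]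

-- the dangling-page fixup keeps the key list
lemma pv_fixup_keys : ∀ (ks : List String) (c : PySem.Dict String (List String)),
    (∀ x ∈ ks, x ∈ c.keys) →
    (ks.foldl (fun c page => if c.getD page [] = [] then c.insert page (PySem.Dict.keys c) else c) c).keys
      = c.keys := by
  intro ks
  induction ks with
  | nil => intro c _; rfl
  | cons k ks ih =>
    intro c h
    have hk : c.contains k = true := by
      rw [PySem.Dict.contains_iff_mem_keys]; exact h k (by simp)
    rw [List.foldl_cons]
    by_cases hg : c.getD k [] = []
    · have hins : (c.insert k (PySem.Dict.keys c)).keys = c.keys :=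
        PySem.Dict.keys_insert_of_contains _ _ hk
      rw [if_pos hg, ih _ (by rw [hins]; exact fun x hx => h x (List.mem_cons_of_mem _ hx)), hins]
    · rw [if_neg hg]
      exact ih _ (fun x hx => h x (List.mem_cons_of_mem _ hx))

-- the dangling-page fixup, item by item
lemma pv_fixup_items : ∀ (ks : List String) (c : PySem.Dict String (List String)),
    c.keys.Nodup → (∀ x ∈ ks, x ∈ c.keys) →
    (ks.foldl (fun c page => if c.getD page [] = [] then c.insert page (PySem.Dict.keys c) else c) c).items
      = c.items.map (fun p => if p.1 ∈ ks ∧ p.2 = [] then (p.1, c.keys) else p) := by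
  intro ks
  induction ks with
  | nil => intro c _ _; simp
  | cons k ks ih =>
    intro c hnd h
    have hk : c.contains k = true := by
      rw [PySem.Dict.contains_iff_mem_keys]; exact h k (by simp)
    have hkeysne : c.keys ≠ [] := List.ne_nil_of_mem (h k (by simp))
    rw [List.foldl_cons]
    by_cases hg : c.getD k [] = []
    · have hins : (c.insert k (PySem.Dict.keys c)).keys = c.keys :=
        PySem.Dict.keys_insert_of_contains _ _ hk
      rw [if_pos hg,
        ih _ (by rw [hins]; exact hnd) (by rw [hins]; exact fun x hx => h x (List.mem_cons_of_mem _ hx)),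
        PySem.Dict.items_insert_of_contains _ _ hk, hins, List.map_map]
      apply List.map_congr_left
      rintro ⟨a, b⟩ hp
      have hgd : c.getD a [] = b := PySem.Dict.getD_of_mem_items _ hp hnd []
      by_cases hak : a = k
      · subst hak
        have hb : b = [] := by rw [← hgd]; exact hg
        subst hb
        simp [hkeysne]
      · simp [Function.comp, hak, List.mem_cons, beq_iff_eq]
    · rw [if_neg hg, ih _ hnd (fun x hx => h x (List.mem_cons_of_mem _ hx))]
      apply List.map_congr_left
      rintro ⟨a, b⟩ hp
      have hgd : c.getD a [] = b := PySem.Dict.getD_of_mem_items _ hp hnd []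
      by_cases hak : a = k
      · subst hak
        have hb : b ≠ [] := by rw [← hgd]; exact hg
        simp [hb]
      · simp [hak, List.mem_cons]

-- B's inner loop keeps the key list
lemma pv_inner_keys (K : List String) (src : String) :
    ∀ (ts : List String) (r : PySem.Dict String (PySem.Set String)),
    (∀ x ∈ K, x ∈ r.keys) →
    (ts.foldl (fun r t =>
        if K.contains t then r.modify t PySem.Set.empty (fun s => PySem.Set.add s src) else r) r).keys
      = r.keys := by
  intro ts
  induction ts with
  | nil => intro r _; rfl
  | cons t ts ih =>
    intro r hKr
    rw [List.foldl_cons]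
    by_cases hK : K.contains t
    · have ht : r.contains t = true := by
        rw [PySem.Dict.contains_iff_mem_keys]; exact hKr t (by simpa using hK)
      have hkeys : (r.modify t PySem.Set.empty (fun s => PySem.Set.add s src)).keys = r.keys := by
        rw [PySem.Dict.keys_modify, PySem.Dict.keys_insert_of_contains _ _ ht]
      rw [if_pos hK, ih _ (by rw [hkeys]; exact hKr), hkeys]
    · rw [if_neg hK]
      exact ih _ hKr

-- B's inner loop, looked up at one page
lemma pv_inner_getD (K : List String) (src page : String) :
    ∀ (ts : List String) (r : PySem.Dict String (PySem.Set String)),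
    (ts.foldl (fun r t =>
        if K.contains t then r.modify t PySem.Set.empty (fun s => PySem.Set.add s src) else r) r).getD
        page PySem.Set.empty
      = if page ∈ ts ∧ page ∈ K then PySem.Set.add (r.getD page PySem.Set.empty) src
        else r.getD page PySem.Set.empty := by
  intro ts
  induction ts with
  | nil => intro r; simp
  | cons t ts ih =>
    intro r
    rw [List.foldl_cons, ih]
    by_cases hK : K.contains t
    · rw [if_pos hK, PySem.Dict.getD_modify]
      by_cases hpt : page = t
      · subst hpt
        have hpK : page ∈ K := by simpa using hK
        simp [hpK]
      · simp [hpt, List.mem_cons]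
    · rw [if_neg hK]
      by_cases hpt : page = t
      · subst hpt
        have hpK : page ∉ K := by simpa using hK
        simp [hpK]
      · simp [hpt, List.mem_cons]

-- B's edge pass keeps the key list
lemma pv_outer_keys (K : List String) :
    ∀ (L : List (String × List String)) (r : PySem.Dict String (PySem.Set String)),
    (∀ x ∈ K, x ∈ r.keys) →
    (L.foldl (fun r p =>
        (if p.2 = [] then K else p.2).foldl (fun r t =>
          if K.contains t then r.modify t PySem.Set.empty (fun s => PySem.Set.add s p.1) else r) r) r).keys
      = r.keys := by
  intro L
  induction L with
  | nil => intro r _; rfl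
  | cons p L ih =>
    intro r h
    rw [List.foldl_cons]
    have hkeys := pv_inner_keys K p.1 (if p.2 = [] then K else p.2) r h
    rw [ih _ (by rw [hkeys]; exact h), hkeys]

-- B's edge pass, looked up at one page, is A's source-collecting fold
lemma pv_outer_getD (K : List String) (page : String) (hp : page ∈ K) :
    ∀ (L : List (String × List String)) (r : PySem.Dict String (PySem.Set String)),
    (L.foldl (fun r p =>
        (if p.2 = [] then K else p.2).foldl (fun r t =>
          if K.contains t then r.modify t PySem.Set.empty (fun s => PySem.Set.add s p.1) else r) r) r).getD
        page PySem.Set.empty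
      = L.foldl (fun s p =>
          if (if p.2 = [] then K else p.2).contains page then PySem.Set.add s p.1 else s)
          (r.getD page PySem.Set.empty) := by
  intro L
  induction L with
  | nil => intro r; rfl
  | cons p L ih =>
    intro r
    rw [List.foldl_cons, List.foldl_cons, ih]
    congr 1
    rw [pv_inner_getD]
    by_cases hts : page ∈ (if p.2 = [] then K else p.2)
    · simp [hts, hp]
    · simp [hts]

-- the dict comprehension {page: set() for page in keys}: every value is the empty set
lemma pv_rev0_getD :
    ∀ (ks : List String) (r : PySem.Dict String (PySem.Set String)),
    (∀ q, r.getD q PySem.Set.empty = PySem.Set.empty) →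
    ∀ q, (ks.foldl (fun r p => r.insert p PySem.Set.empty) r).getD q PySem.Set.empty
      = PySem.Set.empty := by
  intro ks
  induction ks with
  | nil => intro r h q; exact h q
  | cons k ks ih =>
    intro r h q
    rw [List.foldl_cons]
    refine ih _ (fun q' => ?_) q
    rw [PySem.Dict.getD_insert]
    split
    · rfl
    · exact h q'

-- the dict comprehension lists exactly the given (nodup) keys
lemma pv_rev0_keys (ks : List String) (h : ks.Nodup) :
    (ks.foldl (fun (r : PySem.Dict String (PySem.Set String)) p => r.insert p PySem.Set.empty)
      PySem.Dict.empty).keys = ks := by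
  rw [PySem.Dict.keys_foldl_insert ks (fun _ _ => PySem.Set.empty) PySem.Dict.empty]
  have : PySem.Set.update (PySem.Dict.empty : PySem.Dict String (PySem.Set String)).keys ks
      = ks.foldl PySem.Set.add [] := by rfl
  rw [this]
  simpa using pv_foldl_add_nodup ks [] (by simpa using h)

-- A's second loop: inserting each (nodup) page once with its source set
lemma pv_items_insert_loop (v : String → PySem.Set String) (ks : List String) (hnd : ks.Nodup) :
    (ks.foldl (fun r page => r.insert page (v page))
      (PySem.Dict.empty : PySem.Dict String (PySem.Set String))).items
      = ks.map (fun page => (page, v page)) := by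
  have h := PySem.Dict.items_foldl_insert_fresh ks (fun a => a) v PySem.Dict.empty
    (fun a _ => by simp) (by simpa using hnd)
  simpa using h

-- port A computes, page by page, the per-page source fold over the fixed-up corpus
lemma pv_portA (corpus : List (String × List String)) (hPre : (corpus.map Prod.fst).Nodup) :
    reverse_corpus corpus
      = (corpus.map Prod.fst).map (fun page => (page,
          corpus.foldl (fun s p =>
            if (if p.2 = [] then corpus.map Prod.fst else p.2).contains page
            then PySem.Set.add s p.1 else s) PySem.Set.empty)) := by
  have hKeq : (PySem.Dict.mk corpus).keys = corpus.map Prod.fst := pv_keys_mk corpus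
  have hmem : ∀ x ∈ (PySem.Dict.mk corpus).keys, x ∈ (PySem.Dict.mk corpus).keys := fun x hx => hx
  have hnd : (PySem.Dict.mk corpus).keys.Nodup := by rw [hKeq]; exact hPre
  have hFi : ((PySem.Dict.mk corpus).keys.foldl
        (fun c page => if c.getD page [] = [] then c.insert page (PySem.Dict.keys c) else c)
        (PySem.Dict.mk corpus)).items
      = corpus.map (fun p => (p.1, if p.2 = [] then corpus.map Prod.fst else p.2)) := by
    rw [pv_fixup_items _ _ hnd hmem, show (PySem.Dict.mk corpus).items = corpus from rfl]
    apply List.map_congr_left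
    rintro ⟨a, b⟩ hp
    have ha : a ∈ (PySem.Dict.mk corpus).keys := by
      rw [hKeq]; exact List.mem_map.mpr ⟨(a, b), hp, rfl⟩
    by_cases hb : b = []
    · rw [if_pos ⟨ha, hb⟩, hKeq]; simp [hb]
    · rw [if_neg (fun h => hb h.2)]; simp [hb]
  have hFk : ((PySem.Dict.mk corpus).keys.foldl
        (fun c page => if c.getD page [] = [] then c.insert page (PySem.Dict.keys c) else c)
        (PySem.Dict.mk corpus)).keys
      = corpus.map Prod.fst := by rw [pv_fixup_keys _ _ hmem, hKeq]
  simp only [reverse_corpus]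
  simp only [hFi, hFk]
  rw [pv_items_insert_loop _ _ hPre]
  simp only [List.foldl_map]

-- port B: the accumulated dict, read back page by page
lemma pv_portB (corpus : List (String × List String)) (hPre : (corpus.map Prod.fst).Nodup) :
    reverse_corpus_alt corpus
      = (corpus.map Prod.fst).map (fun page => (page,
          corpus.foldl (fun s p =>
            if (if p.2 = [] then corpus.map Prod.fst else p.2).contains page
            then PySem.Set.add s p.1 else s) PySem.Set.empty)) := by
  have hKeq : (PySem.Dict.mk corpus).keys = corpus.map Prod.fst := pv_keys_mk corpus
  have hk0 : ((corpus.map Prod.fst).foldl (fun r p => r.insert p PySem.Set.empty)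
      (PySem.Dict.empty : PySem.Dict String (PySem.Set String))).keys = corpus.map Prod.fst :=
    pv_rev0_keys _ hPre
  have hmem0 : ∀ x ∈ corpus.map Prod.fst,
      x ∈ ((corpus.map Prod.fst).foldl (fun r p => r.insert p PySem.Set.empty)
        (PySem.Dict.empty : PySem.Dict String (PySem.Set String))).keys := by
    rw [hk0]; exact fun x hx => hx
  simp only [reverse_corpus_alt]
  simp only [hKeq]
  have hkeys : (corpus.foldl (fun r p =>
        (if p.2 = [] then corpus.map Prod.fst else p.2).foldl (fun r t =>
          if (corpus.map Prod.fst).contains t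
          then r.modify t PySem.Set.empty (fun s => PySem.Set.add s p.1) else r) r)
        ((corpus.map Prod.fst).foldl (fun r p => r.insert p PySem.Set.empty)
          (PySem.Dict.empty : PySem.Dict String (PySem.Set String)))).keys
      = corpus.map Prod.fst := by
    rw [pv_outer_keys _ _ _ hmem0, hk0]
  rw [PySem.Dict.items_eq_map_keys _ (by rw [hkeys]; exact hPre) PySem.Set.empty, hkeys]
  apply List.map_congr_left
  intro page hpage
  rw [pv_outer_getD _ page hpage corpus _,
    pv_rev0_getD _ _ (fun q => PySem.Dict.getD_empty q _) page]

-- ===== VERDICT (by name: the statement is the Claim_ definition above) =====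
theorem reverse_corpus_spec : Claim_equal_reverse_corpus := by
  intro corpus _ hPre
  unfold Spec_reverse_corpus
  rw [pv_portA corpus hPre, pv_portB corpus hPre]
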